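-- pv_equiv track=rewrite | github.com/CindyHexd/2026-0xFUN | packet-stream/score_decode_full.py | descramble
-- ===== SOURCE A (Python) =====
-- def descramble(bits, seed):
--     lfsr = seed & 0xFFFF
--     out = []
--     for bit in bits:
--         outbit = bit ^ (lfsr & 1)
--         out.append(outbit)
--         newbit = ((lfsr >> 15) ^ (lfsr >> 4) ^ (lfsr >> 3) ^ (lfsr >> 2)) & 1
--         lfsr = ((lfsr << 1) & 0xFFFF) | newbit
--     return out
-- ===== SOURCE B (Python) =====
-- def descramble(bits, seed):
--     # Precompute one full period of the keystream (the register map is a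
--     # permutation of the 16-bit states, so the state returns to its start),
--     # then decode by XOR with modular table lookups instead of stepping per bit.
--     s0 = seed & 0xFFFF
--     ks = []
--     state = s0
--     while True:
--         ks.append(state & 1)
--         state = ((state << 1) & 0xFFFF) | (((state >> 15) ^ (state >> 4) ^ (state >> 3) ^ (state >> 2)) & 1)
--         if state == s0:
--             break
--     p = len(ks)
--     return [b ^ ks[i % p] for i, b in enumerate(bits)]
-- ===== Notes on version B (the rewrite author's own statement) =====
-- stated objective: alternative
-- what changed: B precomputes one full period of the LFSR keystream as a table (valid because the 16-bit state map is a permutation, so the state cycles back to its start) and then decodes each bit by XOR with a modular table lookup, instead of A's per-bit register stepping.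
import Mathlib
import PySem

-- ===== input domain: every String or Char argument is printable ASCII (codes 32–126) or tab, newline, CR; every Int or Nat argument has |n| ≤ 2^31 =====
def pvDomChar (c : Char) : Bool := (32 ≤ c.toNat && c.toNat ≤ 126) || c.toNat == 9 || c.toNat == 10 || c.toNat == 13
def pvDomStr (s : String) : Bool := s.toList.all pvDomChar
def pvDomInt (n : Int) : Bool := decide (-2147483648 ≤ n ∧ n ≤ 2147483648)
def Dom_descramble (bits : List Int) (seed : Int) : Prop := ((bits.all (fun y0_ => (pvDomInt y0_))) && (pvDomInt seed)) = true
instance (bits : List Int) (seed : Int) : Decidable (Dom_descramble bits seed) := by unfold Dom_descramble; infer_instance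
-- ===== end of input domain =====

-- B precomputes one full keystream period (the 16-bit state map is a permutation) and decodes by modular table lookup; alternative algorithm, same observable value.

-- ===== PORT A =====
-- A's single loop: state (lfsr, out), appending each XORed bit and advancing the register.
def descrambleLoop : List Int → Int → List Int → List Int
  | [], _, out => out
  | bit :: rest, lfsr, out =>
    let outbit := PySem.Int.bxor bit (PySem.Int.band lfsr 1)
    let newbit := PySem.Int.band
      (PySem.Int.bxor (PySem.Int.bxor (PySem.Int.bxor (lfsr >>> 15) (lfsr >>> 4)) (lfsr >>> 3)) (lfsr >>> 2)) 1
    descrambleLoop rest (PySem.Int.bor (PySem.Int.band (lfsr <<< 1) 0xFFFF) newbit) (out ++ [outbit])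

def descramble (bits : List Int) (seed : Int) : List Int :=
  descrambleLoop bits (PySem.Int.band seed 0xFFFF) []

-- ===== PORT B =====
-- B's while-loop collecting one full period of keystream bits; fuel 65536 only makes the
-- recursion total — the loop provably breaks within 65536 iterations (the state map permutes
-- the 65536 possible states, so the start state recurs). ks.append is ported with a cons
-- accumulator reversed at the loop exit (the linear-time rendering of Python's append loop).
def buildKS : Nat → Int → Int → List Int → List Int
  | 0, _, _, ks => ks.reverse
  | f + 1, s0, state, ks =>
    let ks' := PySem.Int.band state 1 :: ks
    let state' := PySem.Int.bor (PySem.Int.band (state <<< 1) 0xFFFF)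
      (PySem.Int.band
        (PySem.Int.bxor (PySem.Int.bxor (PySem.Int.bxor (state >>> 15) (state >>> 4)) (state >>> 3)) (state >>> 2)) 1)
    if state' = s0 then ks'.reverse else buildKS f s0 state' ks'

def descramble_alt (bits : List Int) (seed : Int) : List Int :=
  let s0 := PySem.Int.band seed 0xFFFF
  let ks := buildKS 65536 s0 s0 []
  let p := PySem.List.len ks
  (PySem.List.enumerate bits 0).map (fun ib => PySem.Int.bxor ib.2 (PySem.List.pyGetD ks (PySem.Int.mod ib.1 p) 0))

-- ===== PRECONDITION & SPEC =====
def Spec_descramble (bits : List Int) (seed : Int) (out : List Int) : Prop := out = descramble_alt bits seed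
instance (bits : List Int) (seed : Int) (out : List Int) : Decidable (Spec_descramble bits seed out) := by unfold Spec_descramble; infer_instance

-- ===== CLAIM (what is proved, stated in full; the proofs are below) =====
def Claim_equal_descramble : Prop := ∀ (bits : List Int) (seed : Int), Dom_descramble bits seed → Spec_descramble bits seed (descramble bits seed)

-- ===== LEMMAS AND PROOFS =====

-- the register update, on the Nat side
def nStep (s : Nat) : Nat :=
  ((s <<< 1) &&& 65535) ||| (((((s >>> 15) ^^^ (s >>> 4)) ^^^ (s >>> 3)) ^^^ (s >>> 2)) &&& 1)

-- the Int step expression both ports write equals nStep on casts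
theorem stepCast (s : Nat) :
    PySem.Int.bor (PySem.Int.band ((s : Int) <<< 1) 0xFFFF)
      (PySem.Int.band
        (PySem.Int.bxor (PySem.Int.bxor (PySem.Int.bxor ((s : Int) >>> 15) ((s : Int) >>> 4)) ((s : Int) >>> 3)) ((s : Int) >>> 2)) 1)
      = ((nStep s : Nat) : Int) := by
  rw [show ((s : Int) <<< 1) = (((s <<< 1 : Nat) : Nat) : Int) from rfl,
    show ((s : Int) >>> 15) = ((s >>> 15 : Nat) : Int) from rfl,
    show ((s : Int) >>> 4) = ((s >>> 4 : Nat) : Int) from rfl,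
    show ((s : Int) >>> 3) = ((s >>> 3 : Nat) : Int) from rfl,
    show ((s : Int) >>> 2) = ((s >>> 2 : Nat) : Int) from rfl,
    show (0xFFFF : Int) = ((65535 : Nat) : Int) by norm_num,
    show (1 : Int) = ((1 : Nat) : Int) by norm_num]
  simp only [PySem.Int.band_natCast, PySem.Int.bxor_natCast, PySem.Int.bor_natCast]
  rfl

theorem bandOneCast (s : Nat) : PySem.Int.band (s : Int) 1 = ((s &&& 1 : Nat) : Int) := by
  have ho : (1 : Int) = ((1 : Nat) : Int) := by norm_num
  rw [ho, PySem.Int.band_natCast]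

theorem band_mask_bounds (a : Int) : 0 ≤ PySem.Int.band a 0xFFFF ∧ PySem.Int.band a 0xFFFF < 65536 := by
  unfold PySem.Int.band
  split_ifs with h1 h2 h2
  · have : a.toNat &&& (0xFFFF : Int).toNat ≤ (0xFFFF : Int).toNat := Nat.and_le_right
    constructor
    · exact Int.natCast_nonneg _
    · omega
  · omega
  · have hsub : (0xFFFF : Int).toNat - ((0xFFFF : Int).toNat &&& (-a - 1).toNat) ≤ (0xFFFF : Int).toNat := Nat.sub_le _ _
    constructor
    · exact Int.natCast_nonneg _
    · omega
  · omega

theorem testBit_nStep (s : Nat) (j : Nat) :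
    (nStep s).testBit j =
      if j = 0 then (((s.testBit 15 ^^ s.testBit 4) ^^ s.testBit 3) ^^ s.testBit 2)
      else (decide (j ≤ 15) && s.testBit (j - 1)) := by
  have hm : (65535 : Nat) = 2 ^ 16 - 1 := by norm_num
  unfold nStep
  rw [hm]
  rcases j with _ | j
  · simp only [Nat.testBit_or, Nat.testBit_and, Nat.testBit_shiftLeft, Nat.testBit_shiftRight,
      Nat.testBit_xor, Nat.testBit_two_pow_sub_one]
    norm_num
  · simp only [Nat.testBit_or, Nat.testBit_and, Nat.testBit_shiftLeft, Nat.testBit_shiftRight,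
      Nat.testBit_xor, Nat.testBit_two_pow_sub_one]
    have h1 : Nat.testBit 1 (j + 1) = false := by
      rw [show (1 : Nat) = 2 ^ 1 - 1 by norm_num, Nat.testBit_two_pow_sub_one]; simp
    rw [h1]
    simp [Bool.and_comm, show (j + 1 < 16) ↔ (j < 15) by omega]

theorem nStep_lt {s : Nat} (_ : s < 65536) : nStep s < 65536 := by
  unfold nStep
  have h1 : (s <<< 1) &&& 65535 < 2 ^ 16 := by
    have := Nat.and_le_right (n := s <<< 1) (m := 65535); omega
  have h2 : ((((s >>> 15) ^^^ (s >>> 4)) ^^^ (s >>> 3)) ^^^ (s >>> 2)) &&& 1 < 2 ^ 16 := by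
    have := Nat.and_le_right (n := ((((s >>> 15) ^^^ (s >>> 4)) ^^^ (s >>> 3)) ^^^ (s >>> 2))) (m := 1); omega
  have := Nat.or_lt_two_pow h1 h2
  omega

theorem testBit_nStep_zero (s : Nat) :
    (nStep s).testBit 0 = (((s.testBit 15 ^^ s.testBit 4) ^^ s.testBit 3) ^^ s.testBit 2) := by
  simpa using testBit_nStep s 0

theorem testBit_nStep_succ (s j : Nat) (hj : j < 15) : (nStep s).testBit (j + 1) = s.testBit j := by
  simp [testBit_nStep, show j + 1 ≤ 15 by omega]

theorem nStep_inj {a b : Nat} (ha : a < 65536) (hb : b < 65536) (h : nStep a = nStep b) : a = b := by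
  have hbits : ∀ j, j ≤ 14 → a.testBit j = b.testBit j := by
    intro j hj
    have hc : (nStep a).testBit (j + 1) = (nStep b).testBit (j + 1) := by rw [h]
    rwa [testBit_nStep_succ a j (by omega), testBit_nStep_succ b j (by omega)] at hc
  have h15 : a.testBit 15 = b.testBit 15 := by
    have hc : (nStep a).testBit 0 = (nStep b).testBit 0 := by rw [h]
    rw [testBit_nStep_zero, testBit_nStep_zero,
      hbits 4 (by omega), hbits 3 (by omega), hbits 2 (by omega)] at hc
    revert hc
    cases a.testBit 15 <;> cases b.testBit 15 <;>
      cases b.testBit 4 <;> cases b.testBit 3 <;> cases b.testBit 2 <;> simp_all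
  apply Nat.eq_of_testBit_eq
  intro i
  rcases lt_or_ge i 15 with hi | hi
  · exact hbits i (by omega)
  · rcases eq_or_lt_of_le hi with hi' | hi'
    · rw [← hi']; exact h15
    · have h2a : a < 2 ^ i := lt_of_lt_of_le ha (by calc (65536 : Nat) = 2 ^ 16 := by norm_num
        _ ≤ 2 ^ i := Nat.pow_le_pow_right (by norm_num) (by omega))
      have h2b : b < 2 ^ i := lt_of_lt_of_le hb (by calc (65536 : Nat) = 2 ^ 16 := by norm_num
        _ ≤ 2 ^ i := Nat.pow_le_pow_right (by norm_num) (by omega))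
      rw [Nat.testBit_lt_two_pow h2a, Nat.testBit_lt_two_pow h2b]

theorem iter_lt {s : Nat} (h : s < 65536) (n : Nat) : nStep^[n] s < 65536 := by
  induction n with
  | zero => simpa using h
  | succ n ih => rw [Function.iterate_succ_apply']; exact nStep_lt ih

theorem iter_inj {x y : Nat} (hx : x < 65536) (hy : y < 65536) (n : Nat)
    (h : nStep^[n] x = nStep^[n] y) : x = y := by
  induction n with
  | zero => simpa using h
  | succ n ih =>
    apply ih
    rw [Function.iterate_succ_apply', Function.iterate_succ_apply'] at h
    exact nStep_inj (iter_lt hx n) (iter_lt hy n) h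

theorem exists_period {s : Nat} (hs : s < 65536) : ∃ d, 0 < d ∧ d ≤ 65536 ∧ nStep^[d] s = s := by
  obtain ⟨i, j, hne, hij⟩ :=
    Fintype.exists_ne_map_eq_of_card_lt (fun i : Fin 65537 => (⟨nStep^[i.1] s, iter_lt hs i.1⟩ : Fin 65536))
      (by simp)
  have key : ∀ (i j : Fin 65537), i.1 < j.1 → nStep^[j.1] s = nStep^[i.1] s →
      ∃ d, 0 < d ∧ d ≤ 65536 ∧ nStep^[d] s = s := by
    intro i j hlt heq
    refine ⟨j.1 - i.1, by omega, by have := j.2; omega, ?_⟩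
    apply iter_inj (iter_lt hs _) hs i.1
    rw [← Function.iterate_add_apply]
    have : i.1 + (j.1 - i.1) = j.1 := by omega
    rw [this, heq]
  have hval : nStep^[i.1] s = nStep^[j.1] s := by
    have := congrArg Fin.val hij; simpa using this
  rcases Nat.lt_or_ge i.1 j.1 with hlt | hge
  · exact key i j hlt hval.symm
  · have hlt : j.1 < i.1 := by
      rcases Nat.lt_or_ge j.1 i.1 with h | h
      · exact h
      · exact absurd (Fin.ext (by omega)) hne
    exact key j i hlt hval

theorem iter_mod {s : Nat} {d : Nat} (h : nStep^[d] s = s) (i : Nat) :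
    nStep^[i] s = nStep^[i % d] s := by
  conv_lhs => rw [← Nat.mod_add_div i d]
  rw [Function.iterate_add_apply, Function.iterate_mul]
  rw [Function.iterate_fixed h (i / d)]

theorem buildKS_spec : ∀ (f : Nat) (s0 state : Nat) (ks : List Int) (d : Nat),
    0 < d → d ≤ f → nStep^[d] state = s0 → (∀ j, 0 < j → j < d → nStep^[j] state ≠ s0) →
    buildKS f (s0 : Int) (state : Int) ks
      = ks.reverse ++ (List.range d).map (fun i => ((nStep^[i] state &&& 1 : Nat) : Int)) := by
  intro f
  induction f with
  | zero => intro s0 state ks d hd hdf _ _; omega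
  | succ f ih =>
    intro s0 state ks d hd hdf hret hmin
    rw [buildKS]
    simp only [stepCast, Nat.cast_inj]
    by_cases hcase : nStep state = s0
    · rw [if_pos hcase]
      have hd1 : d = 1 := by
        by_contra hne
        exact hmin 1 (by omega) (by omega) (by simpa using hcase)
      subst hd1
      simp [bandOneCast]
    · rw [if_neg hcase]
      have hd2 : 2 ≤ d := by
        rcases Nat.lt_or_ge d 2 with h | h
        · interval_cases d
          · exact absurd (by simpa using hret) hcase
        · exact h
      rw [ih s0 (nStep state) (PySem.Int.band (state : Int) 1 :: ks) (d - 1) (by omega) (by omega)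
        (by calc nStep^[d - 1] (nStep state) = nStep^[(d - 1) + 1] state :=
                (Function.iterate_succ_apply nStep (d - 1) state).symm
              _ = nStep^[d] state := by rw [show (d - 1) + 1 = d by omega]
              _ = s0 := hret)
        (by intro j hj0 hjd
            have := hmin (j + 1) (by omega) (by omega)
            rwa [Function.iterate_succ_apply] at this)]
      have hrange : d = (d - 1) + 1 := by omega
      rw [hrange, List.range_succ_eq_map]
      simp [bandOneCast, Function.iterate_succ_apply, Function.comp]

theorem descrambleLoop_spec : ∀ (bits : List Int) (s : Nat) (out : List Int),
    descrambleLoop bits (s : Int) out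
      = out ++ bits.mapIdx (fun i b => PySem.Int.bxor b ((nStep^[i] s &&& 1 : Nat) : Int)) := by
  intro bits
  induction bits with
  | nil => intro s out; simp [descrambleLoop]
  | cons b rest ih =>
    intro s out
    rw [descrambleLoop]
    simp only [stepCast, bandOneCast]
    rw [ih (nStep s), List.mapIdx_cons]
    have hfun : (fun (i : Nat) (b : Int) => PySem.Int.bxor b ((nStep^[i] (nStep s) &&& 1 : Nat) : Int))
        = fun (i : Nat) (b : Int) => PySem.Int.bxor b ((nStep^[i + 1] s &&& 1 : Nat) : Int) := by
      funext i b; rw [Function.iterate_succ_apply]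
    rw [hfun]
    simp

theorem enumerate_map_mapIdx {α β : Type} (bits : List α) (f : Int × α → β) :
    ∀ (k : Nat), (PySem.List.enumerate bits (k : Int)).map f
      = bits.mapIdx (fun i b => f (((k + i : Nat) : Int), b)) := by
  induction bits with
  | nil => intro k; simp [PySem.List.enumerate]
  | cons x t ih =>
    intro k
    rw [PySem.List.enumerate]
    have hk1 : (k : Int) + 1 = ((k + 1 : Nat) : Int) := by push_cast; ring
    rw [List.map_cons, hk1, ih (k + 1), List.mapIdx_cons]
    congr 2
    funext i b
    congr 2
    push_cast
    ring

-- ===== VERDICT (by name: the statement is the Claim_ definition above) =====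
theorem descramble_spec : Claim_equal_descramble := by
  intro bits seed _
  unfold Spec_descramble
  obtain ⟨hnn, hub⟩ := band_mask_bounds seed
  have hs0 : PySem.Int.band seed 0xFFFF = (((PySem.Int.band seed 0xFFFF).toNat : Nat) : Int) := by omega
  set s0 : Nat := (PySem.Int.band seed 0xFFFF).toNat with hs0n
  have hs0lt : s0 < 65536 := by omega
  have hex : ∃ d, 0 < d ∧ nStep^[d] s0 = s0 := by
    obtain ⟨d, hd1, _, hd3⟩ := exists_period hs0lt
    exact ⟨d, hd1, hd3⟩
  obtain ⟨hdpos, hdret⟩ := Nat.find_spec hex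
  set d := Nat.find hex with hdd
  have hdle : d ≤ 65536 := by
    obtain ⟨d0, hd1, hd2, hd3⟩ := exists_period hs0lt
    exact le_trans (Nat.find_min' hex ⟨hd1, hd3⟩) hd2
  have hmin : ∀ j, 0 < j → j < d → nStep^[j] s0 ≠ s0 := by
    intro j hj0 hjd hj
    exact Nat.find_min hex hjd ⟨hj0, hj⟩
  have hA : descramble bits seed = descrambleLoop bits (PySem.Int.band seed 0xFFFF) [] := rfl
  have hB : descramble_alt bits seed
      = (PySem.List.enumerate bits 0).map (fun ib => PySem.Int.bxor ib.2
          (PySem.List.pyGetD (buildKS 65536 (PySem.Int.band seed 0xFFFF) (PySem.Int.band seed 0xFFFF) [])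
            (PySem.Int.mod ib.1
              (PySem.List.len (buildKS 65536 (PySem.Int.band seed 0xFFFF) (PySem.Int.band seed 0xFFFF) []))) 0)) := rfl
  rw [hA, hB, hs0]
  rw [buildKS_spec 65536 s0 s0 [] d hdpos hdle hdret hmin]
  rw [descrambleLoop_spec]
  rw [show (0 : Int) = ((0 : Nat) : Int) by norm_num, enumerate_map_mapIdx]
  simp only [List.reverse_nil, List.nil_append]
  apply List.mapIdx_eq_mapIdx_iff.mpr
  intro i hi
  simp only [Nat.zero_add]
  rw [show PySem.List.len ((List.range d).map (fun i => ((nStep^[i] s0 &&& 1 : Nat) : Int))) = ((d : Nat) : Int)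
      by simp [PySem.List.len_eq]]
  rw [PySem.Int.mod_natCast, PySem.List.pyGetD_natCast]
  have hget : ((List.range d).map (fun i => ((nStep^[i] s0 &&& 1 : Nat) : Int))).getD (i % d) (((0 : Nat) : Int))
      = ((nStep^[i % d] s0 &&& 1 : Nat) : Int) := by
    have hlt : i % d < d := Nat.mod_lt _ hdpos
    rw [List.getD_eq_getElem?_getD]
    simp [List.getElem?_map, List.getElem?_range hlt]
  rw [hget, iter_mod hdret i]
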